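-- pv_equiv track=rewrite | github.com/abhigandesri13/TCS-codevita-season-13 | TCS Round 2/8.py | paddle_options_for_landing
-- ===== SOURCE A (Python) =====
-- def paddle_options_for_landing(C, paddle_len, landing_col):
--     options = []
--     left_min = max(0, landing_col - paddle_len + 1)
--     left_max = min(landing_col, C - paddle_len)
--     for left in range(left_min, left_max+1):
--         if left <= landing_col <= left + paddle_len - 1:
--             if landing_col == left:
--                 options.append((left, 'left'))
--             elif landing_col == left + paddle_len - 1:
--                 options.append((left, 'right'))
--             else:
--                 options.append((left, 'center'))
--     # deduplicate keeping one of each edge type preferring center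
--     seen = set()
--     dedup = []
--     pref = {'center':0,'left':1,'right':2}
--     options.sort(key=lambda x: (pref[x[1]], x[0]))
--     for opt in options:
--         if opt[1] not in seen:
--             dedup.append(opt)
--             seen.add(opt[1])
--     return dedup
-- ===== SOURCE B (Python) =====
-- def paddle_options_for_landing(C, paddle_len, landing_col):
--     # O(1) case analysis: at most one option of each edge type exists, with
--     # output order center, left, right (A's preference order).
--     lo = max(0, landing_col - paddle_len + 1)
--     hi = min(landing_col, C - paddle_len)
--     if lo > hi:
--         return []
--     rl = landing_col - paddle_len + 1          # the unique 'right'-edge left position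
--     has_right = paddle_len > 1 and lo == rl
--     out = []
--     c = lo + (1 if has_right else 0)           # smallest candidate not tagged 'right'
--     if c == landing_col:
--         c += 1                                 # skip the 'left'-tagged position
--     if c <= hi:
--         out.append((c, 'center'))
--     if hi == landing_col:
--         out.append((landing_col, 'left'))
--     if has_right:
--         out.append((rl, 'right'))
--     return out
-- ===== Notes on version B (the rewrite author's own statement) =====
-- stated objective: faster
-- what changed: Replaces A's O(paddle_len) loop over all left positions plus a sort and a dedup pass by an O(1) case analysis of the range bounds that emits directly the at-most-three options (minimal center, left, right) in A's preference order.
import Mathlib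
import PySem

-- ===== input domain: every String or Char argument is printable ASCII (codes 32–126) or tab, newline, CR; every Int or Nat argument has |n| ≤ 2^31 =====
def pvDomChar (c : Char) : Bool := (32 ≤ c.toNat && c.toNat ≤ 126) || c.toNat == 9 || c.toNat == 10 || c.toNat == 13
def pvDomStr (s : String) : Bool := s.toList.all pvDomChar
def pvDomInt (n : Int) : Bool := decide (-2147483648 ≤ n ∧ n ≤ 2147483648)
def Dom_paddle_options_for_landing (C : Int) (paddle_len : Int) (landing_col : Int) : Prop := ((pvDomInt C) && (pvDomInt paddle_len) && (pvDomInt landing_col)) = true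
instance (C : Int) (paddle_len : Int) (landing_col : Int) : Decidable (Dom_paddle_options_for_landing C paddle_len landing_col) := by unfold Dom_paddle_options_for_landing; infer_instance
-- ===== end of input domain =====

-- B replaces A's O(paddle_len) loop + sort + dedup pass by an O(1) case analysis of the
-- range bounds that emits the at-most-three options directly in A's preference order.

-- ===== PORT A =====
-- A-side helper: the literal dict pref = {'center':0,'left':1,'right':2}
def pvPref : PySem.Dict String Int := PySem.Dict.ofList [("center", 0), ("left", 1), ("right", 2)]

-- pref[x[1]]: every tag stored in options is a key of pref, so the KeyError branch of the
-- subscript is unreachable; getD with default 0 is exact on the reachable values.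
def paddle_options_for_landing (C : Int) (paddle_len : Int) (landing_col : Int) : List (Int × String) :=
  let left_min := max 0 (landing_col - paddle_len + 1)
  let left_max := min landing_col (C - paddle_len)
  let options := (PySem.List.pyRange left_min (left_max + 1) 1).foldl
    (fun options left =>
      if left ≤ landing_col ∧ landing_col ≤ left + paddle_len - 1 then
        if landing_col = left then options ++ [(left, "left")]
        else if landing_col = left + paddle_len - 1 then options ++ [(left, "right")]
        else options ++ [(left, "center")]
      else options) []
  let options := PySem.List.sorted2 options (fun x => PySem.Dict.getD pvPref x.2 0) (fun x => x.1)
  let st := options.foldl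
    (fun (st : PySem.Set String × List (Int × String)) opt =>
      if PySem.Set.contains st.1 opt.2 then st
      else (PySem.Set.add st.1 opt.2, st.2 ++ [opt])) (PySem.Set.empty, [])
  st.2

-- ===== PORT B =====
def paddle_options_for_landing_alt (C : Int) (paddle_len : Int) (landing_col : Int) : List (Int × String) :=
  let lo := max 0 (landing_col - paddle_len + 1)
  let hi := min landing_col (C - paddle_len)
  if lo > hi then []
  else
    let rl := landing_col - paddle_len + 1
    let has_right := paddle_len > 1 ∧ lo = rl
    let c0 := lo + (if has_right then 1 else 0)
    let c := if c0 = landing_col then c0 + 1 else c0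
    ((if c ≤ hi then [(c, "center")] else []) ++
     (if hi = landing_col then [(landing_col, "left")] else [])) ++
    (if has_right then [(rl, "right")] else [])

-- ===== PRECONDITION & SPEC =====
def Spec_paddle_options_for_landing (C : Int) (paddle_len : Int) (landing_col : Int) (out : List (Int × String)) : Prop := out = paddle_options_for_landing_alt C paddle_len landing_col
instance (C : Int) (paddle_len : Int) (landing_col : Int) (out : List (Int × String)) : Decidable (Spec_paddle_options_for_landing C paddle_len landing_col out) := by unfold Spec_paddle_options_for_landing; infer_instance

-- ===== CLAIM (what is proved, stated in full; the proofs are below) =====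
def Claim_equal_paddle_options_for_landing : Prop := ∀ (C : Int) (paddle_len : Int) (landing_col : Int), Dom_paddle_options_for_landing C paddle_len landing_col → Spec_paddle_options_for_landing C paddle_len landing_col (paddle_options_for_landing C paddle_len landing_col)

-- ===== LEMMAS AND PROOFS =====

-- the tag A's inner branch assigns to a candidate left position
def pvF (pl lc : Int) : Int → Int × String :=
  fun left => (left, if lc = left then "left" else if lc = left + pl - 1 then "right" else "center")

lemma pvF_left (pl lc x : Int) (h : lc = x) : pvF pl lc x = (x, "left") := by
  unfold pvF; rw [if_pos h]

lemma pvF_right (pl lc x : Int) (h1 : lc ≠ x) (h2 : x = lc - pl + 1) :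
    pvF pl lc x = (x, "right") := by
  unfold pvF; rw [if_neg h1, if_pos (by omega)]

lemma pvF_center (pl lc x : Int) (h1 : lc ≠ x) (h2 : x ≠ lc - pl + 1) :
    pvF pl lc x = (x, "center") := by
  unfold pvF; rw [if_neg h1, if_neg (by omega)]

def pvCenters (a b : Int) : List (Int × String) :=
  (PySem.List.pyRange a b 1).map (fun x => (x, "center"))

-- A's option-collecting loop, when the guard holds on every element, is a map
lemma pvFoldA (pl lc : Int) (l : List Int) (acc : List (Int × String))
    (h : ∀ x ∈ l, x ≤ lc ∧ lc ≤ x + pl - 1) :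
    l.foldl (fun options left =>
      if left ≤ lc ∧ lc ≤ left + pl - 1 then
        if lc = left then options ++ [(left, "left")]
        else if lc = left + pl - 1 then options ++ [(left, "right")]
        else options ++ [(left, "center")]
      else options) acc
    = acc ++ l.map (pvF pl lc) := by
  induction l generalizing acc with
  | nil => simp
  | cons x t ih =>
    have hx := h x (List.mem_cons_self ..)
    simp only [List.foldl_cons, List.map_cons]
    rw [if_pos hx]
    split_ifs with h1 h2 <;>
      rw [ih _ (fun y hy => h y (List.mem_cons_of_mem _ hy))] <;> simp_all [pvF]

-- sorted2 named by a strictly lexicographically increasing rearrangement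
lemma pvSorted2_eq (xs ys : List (Int × String)) (k1 k2 : (Int × String) → Int)
    (hperm : ys.Perm xs)
    (hpw : ys.Pairwise (fun a b => k1 a < k1 b ∨ (k1 a = k1 b ∧ k2 a < k2 b))) :
    PySem.List.sorted2 xs k1 k2 = ys := by
  have hkey : PySem.List.sorted2 xs k1 k2
      = PySem.List.sorted xs (fun x => toLex (k1 x, k2 x)) := by
    unfold PySem.List.sorted2 PySem.List.sorted
    have hb : (fun (a b : Int × String) => decide (k1 a < k1 b) || (!decide (k1 b < k1 a) && decide (k2 a < k2 b)))
        = (fun (a b : Int × String) => decide (toLex (k1 a, k2 a) < toLex (k1 b, k2 b))) := by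
      funext a b
      rcases lt_trichotomy (k1 a) (k1 b) with h | h | h
      · simp [Prod.Lex.lt_iff, h, not_lt.2 h.le]
      · simp [Prod.Lex.lt_iff, h]
      · have h3 : k1 a ≠ k1 b := by omega
        simp [Prod.Lex.lt_iff, not_lt.2 h.le, h3, h]
    rw [hb]
  rw [hkey]
  refine PySem.List.sorted_eq_of_perm_of_pairwise_lt _ _ _ hperm (hpw.imp ?_)
  intro a b h
  rcases h with h | h
  · simp [Prod.Lex.lt_iff, h]
  · simp [Prod.Lex.lt_iff, h.1, h.2]

-- the dedup loop skips every element whose tag is already seen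
lemma pvFoldSkip (l : List (Int × String)) (s : PySem.Set String) (out : List (Int × String))
    (h : ∀ x ∈ l, PySem.Set.contains s x.2 = true) :
    l.foldl (fun (st : PySem.Set String × List (Int × String)) opt =>
      if PySem.Set.contains st.1 opt.2 then st
      else (PySem.Set.add st.1 opt.2, st.2 ++ [opt])) (s, out) = (s, out) := by
  induction l with
  | nil => rfl
  | cons x t ih =>
    simp only [List.foldl_cons]
    rw [if_pos (h x (List.mem_cons_self ..))]
    exact ih (fun y hy => h y (List.mem_cons_of_mem _ hy))

-- sort + dedup of (right?) ++ centers ++ (left?) = first center ++ left? ++ right?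
lemma pvPipeline (a b : Int) (L R : List (Int × String))
    (hL : L = [] ∨ ∃ v : Int, L = [(v, "left")])
    (hR : R = [] ∨ ∃ w : Int, R = [(w, "right")]) :
    ((PySem.List.sorted2 (R ++ pvCenters a b ++ L)
        (fun x => PySem.Dict.getD pvPref x.2 0) (fun x => x.1)).foldl
      (fun (st : PySem.Set String × List (Int × String)) opt =>
        if PySem.Set.contains st.1 opt.2 then st
        else (PySem.Set.add st.1 opt.2, st.2 ++ [opt])) (PySem.Set.empty, [])).2
    = (if a < b then [(a, "center")] else []) ++ L ++ R := by
  have hmemC : ∀ x ∈ pvCenters a b, x.2 = "center" := by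
    intro x hx
    rcases List.mem_map.1 hx with ⟨w, _, rfl⟩
    rfl
  have hsort : PySem.List.sorted2 (R ++ pvCenters a b ++ L)
      (fun x => PySem.Dict.getD pvPref x.2 0) (fun x => x.1) = pvCenters a b ++ L ++ R := by
    apply pvSorted2_eq
    · simpa [List.append_assoc] using
        (List.perm_append_comm (l₁ := pvCenters a b ++ L) (l₂ := R))
    · rw [List.pairwise_append, List.pairwise_append]
      refine ⟨⟨?_, ?_, ?_⟩, ?_, ?_⟩
      · -- centers pairwise
        rw [pvCenters, List.pairwise_map]
        exact (PySem.List.pairwise_lt_pyRange_one a b).imp (fun h => Or.inr ⟨rfl, h⟩)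
      · rcases hL with rfl | ⟨v, rfl⟩ <;> simp
      · -- centers vs L
        intro x hx y hy
        rcases hL with rfl | ⟨v, rfl⟩
        · simp at hy
        · rw [hmemC x hx, List.mem_singleton.1 hy]
          exact Or.inl (by exact (by decide : (0 : Int) < 1))
      · rcases hR with rfl | ⟨w, rfl⟩ <;> simp
      · -- centers++L vs R
        intro x hx y hy
        rcases hR with rfl | ⟨w, rfl⟩
        · simp at hy
        · rw [List.mem_singleton.1 hy]
          rcases List.mem_append.1 hx with hx | hx
          · rw [hmemC x hx]; exact Or.inl (by exact (by decide : (0 : Int) < 2))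
          · rcases hL with rfl | ⟨v, rfl⟩
            · simp at hx
            · rw [List.mem_singleton.1 hx]; exact Or.inl (by exact (by decide : (1 : Int) < 2))
  rw [hsort, List.foldl_append, List.foldl_append]
  by_cases hab : a < b
  · have hC : pvCenters a b = (a, "center") :: pvCenters (a + 1) b := by
      rw [pvCenters, pvCenters, PySem.List.pyRange_one_cons hab, List.map_cons]
    have hmem' : ∀ x ∈ pvCenters (a + 1) b,
        PySem.Set.contains (PySem.Set.add PySem.Set.empty "center") x.2 = true := by
      intro x hx
      have hx' : x ∈ pvCenters a b := by rw [hC]; exact List.mem_cons_of_mem _ hx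
      rw [hmemC x hx']; decide
    rw [hC, List.foldl_cons]
    dsimp only
    rw [if_neg (by decide), pvFoldSkip (pvCenters (a + 1) b) _ _ hmem', if_pos hab]
    rcases hL with rfl | ⟨v, rfl⟩ <;> rcases hR with rfl | ⟨w, rfl⟩
    · simp
    · rw [List.foldl_nil, List.foldl_cons]
      dsimp only
      rw [if_neg (by decide)]
      simp
    · rw [List.foldl_cons]
      dsimp only
      rw [if_neg (by decide)]
      simp
    · simp [List.foldl_cons, List.foldl_nil, PySem.Set.contains, PySem.Set.add,
            PySem.Set.empty]
  · have hC : pvCenters a b = [] := by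
      rw [pvCenters, PySem.List.pyRange_one_eq_nil (by omega), List.map_nil]
    rw [hC, if_neg hab]
    rcases hL with rfl | ⟨v, rfl⟩ <;> rcases hR with rfl | ⟨w, rfl⟩
    · simp
    · rw [List.foldl_nil, List.foldl_nil, List.foldl_cons]
      dsimp only
      rw [if_neg (by decide)]
      simp
    · rw [List.foldl_nil, List.foldl_cons]
      dsimp only
      rw [if_neg (by decide)]
      simp
    · simp [List.foldl_cons, List.foldl_nil, PySem.Set.contains, PySem.Set.add,
            PySem.Set.empty]

lemma pvMain (C pl lc : Int) :
    paddle_options_for_landing C pl lc = paddle_options_for_landing_alt C pl lc := by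
  have hlo1 : 0 ≤ max 0 (lc - pl + 1) := le_max_left _ _
  have hlo2 : lc - pl + 1 ≤ max 0 (lc - pl + 1) := le_max_right _ _
  have hlo3 := max_choice 0 (lc - pl + 1)
  have hhi1 : min lc (C - pl) ≤ lc := min_le_left _ _
  have hhi3 := min_choice lc (C - pl)
  unfold paddle_options_for_landing paddle_options_for_landing_alt
  dsimp only
  generalize hgl : max 0 (lc - pl + 1) = lo at *
  generalize hgh : min lc (C - pl) = hi at *
  by_cases hle : lo ≤ hi
  · -- the range is nonempty
    have hpl : 1 ≤ pl := by omega
    rw [if_neg (by omega : ¬ lo > hi)]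
    rw [pvFoldA pl lc _ []
      (fun x hx => by rw [PySem.List.mem_pyRange_one] at hx; omega), List.nil_append]
    by_cases hR : pl > 1 ∧ lo = lc - pl + 1 <;> by_cases hLc : hi = lc
    · -- right and left present
      have hlist : (PySem.List.pyRange lo (hi + 1) 1).map (pvF pl lc)
          = [(lo, "right")] ++ pvCenters (lo + 1) hi ++ [(hi, "left")] := by
        rw [PySem.List.pyRange_one_cons (by omega),
            PySem.List.pyRange_one_succ_right (by omega),
            List.map_cons, List.map_append, List.map_cons, List.map_nil]
        rw [pvF_right pl lc lo (by omega) (by omega), pvF_left pl lc hi (by omega)]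
        rw [List.map_congr_left (fun x hx => pvF_center pl lc x
          (by rw [PySem.List.mem_pyRange_one] at hx; omega)
          (by rw [PySem.List.mem_pyRange_one] at hx; omega))]
        simp [pvCenters]
      rw [hlist, pvPipeline (lo + 1) hi [(hi, "left")] [(lo, "right")]
            (Or.inr ⟨hi, rfl⟩) (Or.inr ⟨lo, rfl⟩)]
      rw [if_pos hR, if_pos hLc]
      by_cases hc : lo + 1 = lc
      · rw [if_pos hc]
        rw [if_neg (by omega : ¬ lo + 1 < hi), if_neg (by omega : ¬ lo + 1 + 1 ≤ hi)]
        simp [hLc, hR.1, hR.2]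
      · rw [if_neg hc]
        by_cases hcc : lo + 1 < hi
        · rw [if_pos hcc, if_pos (by omega : lo + 1 ≤ hi)]
          simp [hLc, hR.1, hR.2]
        · rw [if_neg hcc, if_neg (by omega : ¬ lo + 1 ≤ hi)]
          simp [hLc, hR.1, hR.2]
    · -- right present, left absent
      have hlist : (PySem.List.pyRange lo (hi + 1) 1).map (pvF pl lc)
          = [(lo, "right")] ++ pvCenters (lo + 1) (hi + 1) ++ [] := by
        rw [PySem.List.pyRange_one_cons (by omega), List.map_cons]
        rw [pvF_right pl lc lo (by omega) (by omega)]
        rw [List.map_congr_left (fun x hx => pvF_center pl lc x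
          (by rw [PySem.List.mem_pyRange_one] at hx; omega)
          (by rw [PySem.List.mem_pyRange_one] at hx; omega))]
        simp [pvCenters]
      rw [hlist, pvPipeline (lo + 1) (hi + 1) [] [(lo, "right")]
            (Or.inl rfl) (Or.inr ⟨lo, rfl⟩)]
      rw [if_pos hR, if_neg hLc]
      by_cases hc : lo + 1 = lc
      · rw [if_pos hc]
        rw [if_neg (by omega : ¬ lo + 1 < hi + 1), if_neg (by omega : ¬ lo + 1 + 1 ≤ hi)]
        simp [hR.1, hR.2]
      · rw [if_neg hc]
        by_cases hcc : lo + 1 ≤ hi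
        · rw [if_pos (by omega : lo + 1 < hi + 1), if_pos hcc]
          simp [hR.1, hR.2]
        · rw [if_neg (by omega : ¬ lo + 1 < hi + 1), if_neg hcc]
          simp [hR.1, hR.2]
    · -- right absent, left present
      have hlist : (PySem.List.pyRange lo (hi + 1) 1).map (pvF pl lc)
          = [] ++ pvCenters lo hi ++ [(hi, "left")] := by
        rw [PySem.List.pyRange_one_succ_right (by omega), List.map_append, List.map_cons,
            List.map_nil]
        rw [pvF_left pl lc hi (by omega)]
        rw [List.map_congr_left (fun x hx => pvF_center pl lc x
          (by rw [PySem.List.mem_pyRange_one] at hx; omega)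
          (by rw [PySem.List.mem_pyRange_one] at hx; omega))]
        simp [pvCenters]
      rw [hlist, pvPipeline lo hi [(hi, "left")] [] (Or.inr ⟨hi, rfl⟩) (Or.inl rfl)]
      rw [if_neg hR, if_pos hLc]
      by_cases hc : lo + 0 = lc
      · rw [if_pos hc]
        rw [if_neg (by omega : ¬ lo < hi), if_neg (by omega : ¬ lo + 0 + 1 ≤ hi)]
        simp [hLc]
        try omega
      · rw [if_neg hc]
        by_cases hcc : lo < hi
        · rw [if_pos hcc, if_pos (by omega : lo + 0 ≤ hi)]
          simp [hLc]
          try omega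
        · rw [if_neg hcc, if_neg (by omega : ¬ lo + 0 ≤ hi)]
          simp [hLc]
          try omega
    · -- neither right nor left
      have hlist : (PySem.List.pyRange lo (hi + 1) 1).map (pvF pl lc)
          = [] ++ pvCenters lo (hi + 1) ++ [] := by
        rw [List.map_congr_left (fun x hx => pvF_center pl lc x
          (by rw [PySem.List.mem_pyRange_one] at hx; omega)
          (by rw [PySem.List.mem_pyRange_one] at hx; omega))]
        simp [pvCenters]
      rw [hlist, pvPipeline lo (hi + 1) [] [] (Or.inl rfl) (Or.inl rfl)]
      rw [if_neg hR, if_neg hLc]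
      rw [if_neg (by omega : ¬ lo + 0 = lc)]
      rw [if_pos (by omega : lo < hi + 1), if_pos (by omega : lo + 0 ≤ hi)]
      simp
      try omega
  · -- empty range: A collects nothing, B returns []
    rw [PySem.List.pyRange_one_eq_nil (by omega), if_pos (by omega : lo > hi)]
    rfl

-- ===== VERDICT (by name: the statement is the Claim_ definition above) =====
theorem paddle_options_for_landing_spec : Claim_equal_paddle_options_for_landing := by
  intro C pl lc _
  exact pvMain C pl lc
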